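-- pv_equiv track=rewrite | github.com/Vathanakchanarch/OS-CPU-Scheduling-Team2 | OS-CPU-Scheduling-Team2.py | normalize_gantt
-- ===== SOURCE A (Python) =====
-- from typing import List, Dict, Tuple, Optional
--
-- def normalize_gantt(timeline: List[str]) -> List[Tuple[int, int, str]]:
--     if not timeline:
--         return []
--     gantt = []
--     start = 0
--     current = timeline[0]
--     for t in range(1, len(timeline)):
--         if timeline[t] != current:
--             gantt.append((start, t, current))
--             start = t
--             current = timeline[t]
--     gantt.append((start, len(timeline), current))
--     return gantt
-- ===== SOURCE B (Python) =====
-- def normalize_gantt(timeline):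
--     if not timeline:
--         return []
--     n = len(timeline)
--     bounds = [0] + [i for i in range(1, n) if timeline[i] != timeline[i - 1]] + [n]
--     return [(bounds[k], bounds[k + 1], timeline[bounds[k]]) for k in range(len(bounds) - 1)]
-- ===== Notes on version B (the rewrite author's own statement) =====
-- stated objective: alternative
-- what changed: Replaces the single pass with a (gantt, start, current) accumulator by a two-pass boundary-table construction: first collect the indices where the label changes, then pair consecutive boundaries into segments.
import Mathlib
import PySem

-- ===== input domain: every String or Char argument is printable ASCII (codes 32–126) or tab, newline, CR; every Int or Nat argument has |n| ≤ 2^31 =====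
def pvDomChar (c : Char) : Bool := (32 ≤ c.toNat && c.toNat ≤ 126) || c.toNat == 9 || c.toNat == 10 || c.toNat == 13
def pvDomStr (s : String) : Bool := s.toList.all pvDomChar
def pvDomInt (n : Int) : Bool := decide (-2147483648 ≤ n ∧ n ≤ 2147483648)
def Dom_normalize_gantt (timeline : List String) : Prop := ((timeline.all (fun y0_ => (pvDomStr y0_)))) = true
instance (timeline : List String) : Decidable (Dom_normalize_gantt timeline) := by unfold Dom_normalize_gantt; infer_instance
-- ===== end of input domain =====

-- B replaces A's single accumulator pass by a boundary table plus a pairing pass (alternative decomposition, same cost).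

-- ===== PORT A =====
-- A's loop body (the 'if timeline[t] != current' update of (gantt, start, current)).
-- Loop indices t run over 1..len-1, always non-negative and in range, so the port keeps
-- them as Nat and reads timeline[t] with getD "" (exact on in-range indices).
def loopA (timeline : List String) (s : List (Int × Int × String) × Nat × String)
    (t : Nat) : List (Int × Int × String) × Nat × String :=
  let x := timeline.getD t ""      -- timeline[t], t in range
  if x ≠ s.2.2 then (s.1 ++ [((s.2.1 : Int), (t : Int), s.2.2)], t, x) else s

def normalize_gantt (timeline : List String) : List (Int × Int × String) :=
  match timeline with
  | [] => []
  | c0 :: _ =>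
    let n := timeline.length
    let st := (List.range' 1 (n - 1)).foldl (loopA timeline) ([], 0, c0)
    st.1 ++ [((st.2.1 : Int), (n : Int), st.2.2)]

-- ===== PORT B =====
-- bounds holds only in-range indices (and len itself, never dereferenced, since
-- timeline[bounds[k]] is only taken for k < len(bounds)-1), so getD "" is exact.
def normalize_gantt_alt (timeline : List String) : List (Int × Int × String) :=
  if timeline.isEmpty then [] else
    let n := timeline.length
    let bounds : List Nat :=
      [0] ++ (List.range' 1 (n - 1)).filter (fun i => timeline.getD i "" ≠ timeline.getD (i - 1) "") ++ [n]
    (List.range (bounds.length - 1)).map (fun k =>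
      ((bounds.getD k 0 : Int), (bounds.getD (k + 1) 0 : Int), timeline.getD (bounds.getD k 0) ""))

-- ===== PRECONDITION & SPEC =====
def Spec_normalize_gantt (timeline : List String) (out : List (Int × Int × String)) : Prop := out = normalize_gantt_alt timeline
instance (timeline : List String) (out : List (Int × Int × String)) : Decidable (Spec_normalize_gantt timeline out) := by unfold Spec_normalize_gantt; infer_instance

-- ===== CLAIM (what is proved, stated in full; the proofs are below) =====
def Claim_equal_normalize_gantt : Prop := ∀ (timeline : List String), Dom_normalize_gantt timeline → Spec_normalize_gantt timeline (normalize_gantt timeline)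

-- ===== LEMMAS AND PROOFS =====

-- Consecutive-boundary segments of a boundary list, with labels read through f.
def segsOf (f : Nat → String) : List Nat → List (Int × Int × String)
  | [] => []
  | [_] => []
  | b1 :: b2 :: rest => ((b1 : Int), (b2 : Int), f b1) :: segsOf f (b2 :: rest)

-- the boundaries among indices 1..k
def bnds (timeline : List String) (k : Nat) : List Nat :=
  0 :: (List.range' 1 k).filter (fun i => timeline.getD i "" ≠ timeline.getD (i - 1) "")

theorem bnds_ne_nil (timeline : List String) (k : Nat) : bnds timeline k ≠ [] := by
  simp [bnds]

-- B's index-pairing pass computes segsOf.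
theorem map_pairs_eq_segsOf (f : Nat → String) (bs : List Nat) (h : bs ≠ []) :
    (List.range (bs.length - 1)).map (fun k =>
      ((bs.getD k 0 : Int), (bs.getD (k + 1) 0 : Int), f (bs.getD k 0))) = segsOf f bs := by
  induction bs with
  | nil => simp at h
  | cons b1 rest ih =>
    cases rest with
    | nil => simp [segsOf]
    | cons b2 rest' =>
      simp only [List.length_cons, Nat.add_sub_cancel, List.range_succ_eq_map,
        List.map_cons, List.map_map]
      rw [show segsOf f (b1 :: b2 :: rest') = ((b1 : Int), (b2 : Int), f b1) :: segsOf f (b2 :: rest') from rfl]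
      congr 1
      have := ih (by simp)
      simp only [List.length_cons, Nat.add_sub_cancel] at this
      rw [← this]
      apply List.map_congr_left
      intro k _
      simp [Function.comp]

theorem segsOf_concat (f : Nat → String) (xs : List Nat) (b : Nat) (h : xs ≠ []) :
    segsOf f (xs ++ [b]) =
      segsOf f xs ++ [((xs.getLast h : Int), (b : Int), f (xs.getLast h))] := by
  induction xs with
  | nil => simp at h
  | cons x rest ih =>
    cases rest with
    | nil => simp [segsOf]
    | cons y rest' =>
      have step : segsOf f ((x :: y :: rest') ++ [b])
          = ((x : Int), (y : Int), f x) :: segsOf f ((y :: rest') ++ [b]) := rfl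
      rw [step, ih (by simp)]
      simp [segsOf, List.getLast_cons]

-- The loop invariant of A's fold: after processing indices 1..k, the accumulated
-- gantt is segsOf of the boundaries so far, start is the last boundary, current is
-- its label, and the label at index k is still current.
theorem foldA_invariant (timeline : List String) (c0 : String) (rest0 : List String)
    (htl : timeline = c0 :: rest0) (k : Nat) :
    (List.range' 1 k).foldl (loopA timeline) ([], 0, c0)
    = (segsOf (fun i => timeline.getD i "") (bnds timeline k),
       (bnds timeline k).getLast (bnds_ne_nil timeline k),
       timeline.getD ((bnds timeline k).getLast (bnds_ne_nil timeline k)) "")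
    ∧ timeline.getD k "" =
        timeline.getD ((bnds timeline k).getLast (bnds_ne_nil timeline k)) "" := by
  induction k with
  | zero =>
    constructor
    · simp [bnds, segsOf, htl]
    · simp [bnds]
  | succ k ih =>
    obtain ⟨ihfold, ihlab⟩ := ih
    have hrange : List.range' 1 (k + 1) = List.range' 1 k ++ [k + 1] := by
      simpa [Nat.add_comm] using (List.range'_concat (s := 1) (n := k) (step := 1))
    rw [hrange, List.foldl_append, ihfold, List.foldl_cons, List.foldl_nil]
    set L := (bnds timeline k).getLast (bnds_ne_nil timeline k) with hL
    have hcondsplit : bnds timeline (k + 1) =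
        bnds timeline k ++
          if timeline.getD (k + 1) "" ≠ timeline.getD k "" then [k + 1] else [] := by
      simp only [bnds, hrange, List.filter_append, List.filter_singleton,
        Nat.add_sub_cancel, List.cons_append]
      by_cases hc : timeline.getD (k + 1) "" = timeline.getD k "" <;>
        simp only [List.getD_eq_getElem?_getD] at hc <;> simp [hc]
    by_cases hc : timeline.getD (k + 1) "" = timeline.getD L ""
    · -- same label: no new boundary, state unchanged
      have hc' : timeline.getD (k + 1) "" = timeline.getD k "" := by rw [hc, ← ihlab]
      have hb : bnds timeline (k + 1) = bnds timeline k := by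
        rw [hcondsplit, if_neg (not_ne_iff.mpr hc')]; simp
      constructor
      · simp only [loopA]
        rw [if_neg (not_ne_iff.mpr hc)]
        simp only [hb, ← hL]
      · simp only [hb, ← hL]; exact hc
    · -- label changes: index k+1 becomes a boundary, a segment is emitted
      have hc' : timeline.getD (k + 1) "" ≠ timeline.getD k "" := by
        rw [ihlab]; exact hc
      have hb : bnds timeline (k + 1) = bnds timeline k ++ [k + 1] := by
        rw [hcondsplit, if_pos hc']
      have hlast : (bnds timeline (k + 1)).getLast (bnds_ne_nil timeline (k + 1)) = k + 1 := by
        simp [hb]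
      constructor
      · simp only [loopA]
        rw [if_pos hc]
        simp only [hb,
          segsOf_concat (fun i => timeline.getD i "") (bnds timeline k) (k + 1)
            (bnds_ne_nil timeline k), ← hL, List.getLast_concat]
      · simp only [hlast]

-- ===== VERDICT (by name: the statement is the Claim_ definition above) =====
theorem normalize_gantt_spec : Claim_equal_normalize_gantt := by
  intro timeline _
  unfold Spec_normalize_gantt
  cases htl : timeline with
  | nil => simp [normalize_gantt, normalize_gantt_alt]
  | cons c0 rest0 =>
    rw [← htl]
    have hne : timeline ≠ [] := by simp [htl]
    obtain ⟨hfold, _⟩ := foldA_invariant timeline c0 rest0 htl (timeline.length - 1)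
    set n := timeline.length with hn
    set f : Nat → String := fun i => timeline.getD i "" with hf
    set bs := bnds timeline (n - 1) with hbs
    have hA : normalize_gantt timeline =
        segsOf f bs ++ [(((bs.getLast (bnds_ne_nil timeline (n - 1))) : Int), (n : Int),
          f (bs.getLast (bnds_ne_nil timeline (n - 1))))] := by
      conv_lhs => rw [htl]
      unfold normalize_gantt
      simp only
      rw [← htl, hfold]
    have hBbounds : ([0] ++ (List.range' 1 (n - 1)).filter
        (fun i => timeline.getD i "" ≠ timeline.getD (i - 1) "") ++ [n] : List Nat)
        = bs ++ [n] := by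
      simp [hbs, bnds]
    have hB : normalize_gantt_alt timeline = segsOf f (bs ++ [n]) := by
      unfold normalize_gantt_alt
      rw [if_neg (by simp [hne])]
      simp only
      rw [hBbounds]
      exact map_pairs_eq_segsOf f (bs ++ [n]) (by simp)
    rw [hA, hB, segsOf_concat f bs n (bnds_ne_nil timeline (n - 1))]
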